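-- pv_equiv track=rewrite | github.com/aqbtech/flask-bk-cal | flask/app.py | improve_gpa
-- ===== SOURCE A (Python) =====
-- def improve_gpa(courses, improvement_courses):
--     improved_courses = courses.copy()
--     for imp_course in improvement_courses:
--         for i, course in enumerate(improved_courses):
--             if course[0] == imp_course[0]:  # Compare course_code
--                 improved_courses[i] = imp_course  # Update with improved score
--                 break
--     return improved_courses
-- ===== SOURCE B (Python) =====
-- def improve_gpa(courses, improvement_courses):
--     # Index improvements by course code (last duplicate wins), then one pass
--     # over courses replacing only the first occurrence of each indexed code.
--     table = {}
--     for imp in improvement_courses: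
--         table[imp[0]] = imp
--     result = []
--     seen = set()
--     for course in courses:
--         code = course[0]
--         if code in table and code not in seen:
--             result.append(table[code])
--             seen.add(code)
--         else:
--             result.append(course)
--     return result
-- ===== Notes on version B (the rewrite author's own statement) =====
-- stated objective: alternative
-- what changed: Replaces the nested 'for each improvement, linearly scan the course list' with a single dict index of improvements (last-wins) plus one pass over courses guarded by a 'seen' set, so the inner scan disappears.
-- outside the precondition, e.g. on improve_gpa([[]], []): A returns [[]], B raises IndexError; on improve_gpa([['a'], []], [['a', '5']]): A returns [['a', '5'], []], B raises IndexError
import Mathlib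
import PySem

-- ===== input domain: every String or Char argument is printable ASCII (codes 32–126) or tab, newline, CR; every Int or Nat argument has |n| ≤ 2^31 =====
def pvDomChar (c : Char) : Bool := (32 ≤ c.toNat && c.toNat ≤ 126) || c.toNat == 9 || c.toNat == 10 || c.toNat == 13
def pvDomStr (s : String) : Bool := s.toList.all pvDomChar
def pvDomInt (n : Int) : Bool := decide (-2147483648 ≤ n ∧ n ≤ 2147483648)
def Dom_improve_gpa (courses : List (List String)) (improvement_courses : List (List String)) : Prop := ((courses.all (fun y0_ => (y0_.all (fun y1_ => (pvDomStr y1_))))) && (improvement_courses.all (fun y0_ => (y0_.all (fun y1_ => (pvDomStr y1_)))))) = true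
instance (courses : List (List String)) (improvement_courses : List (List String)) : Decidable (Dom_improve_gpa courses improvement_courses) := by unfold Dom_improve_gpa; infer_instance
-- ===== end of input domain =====

-- B replaces A's nested 'for each improvement, scan courses' with a dict index of
-- improvements plus one guarded pass over courses, so the inner scan disappears.

-- row[0]; exact on Pre_ (every row nonempty)
def pvGet0 (r : List String) : String := r.headD ""

-- ===== PORT A =====
-- inner 'for i, course in enumerate(improved_courses): if match: replace; break'
def pvReplaceFirst (code : String) (imp : List String) : List (List String) → List (List String)
  | [] => []
  | c :: cs => if pvGet0 c = code then imp :: cs else c :: pvReplaceFirst code imp cs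

def improve_gpa (courses : List (List String)) (improvement_courses : List (List String)) : List (List String) :=
  improvement_courses.foldl (fun acc imp => pvReplaceFirst (pvGet0 imp) imp acc) courses

-- ===== PORT B =====
-- 'table[imp[0]] = imp' loop
def pvBuildTable (improvement_courses : List (List String)) : PySem.Dict String (List String) :=
  improvement_courses.foldl (fun d imp => d.insert (pvGet0 imp) imp) PySem.Dict.empty

-- one pass over courses with the 'seen' set
def pvPass (table : PySem.Dict String (List String)) (seen : PySem.Set String) : List (List String) → List (List String)
  | [] => []
  | c :: cs =>
    match table.get? (pvGet0 c) with
    | some imp =>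
        if seen.contains (pvGet0 c) then c :: pvPass table seen cs
        else imp :: pvPass table (seen.add (pvGet0 c)) cs
    | none => c :: pvPass table seen cs

def improve_gpa_alt (courses : List (List String)) (improvement_courses : List (List String)) : List (List String) :=
  pvPass (pvBuildTable improvement_courses) PySem.Set.empty courses

-- ===== PRECONDITION & SPEC =====
-- Pre_ excludes inputs containing an empty row: A's course[0]/imp_course[0] accesses raise
-- IndexError on most such inputs and avoid it only by scan-order accident on the rest,
-- while B's single pass always indexes row[0] and raises there.
def Pre_improve_gpa (courses : List (List String)) (improvement_courses : List (List String)) : Prop :=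
  (∀ r ∈ courses, r ≠ []) ∧ (∀ r ∈ improvement_courses, r ≠ [])
instance (courses : List (List String)) (improvement_courses : List (List String)) : Decidable (Pre_improve_gpa courses improvement_courses) := by unfold Pre_improve_gpa; infer_instance

def pvWitness_improve_gpa : List (List String) × List (List String) :=
  ([["CS101", "2.0"], ["MA201", "3.0"]], [["CS101", "3.5"]])

def Spec_improve_gpa (courses : List (List String)) (improvement_courses : List (List String)) (out : List (List String)) : Prop := out = improve_gpa_alt courses improvement_courses
instance (courses : List (List String)) (improvement_courses : List (List String)) (out : List (List String)) : Decidable (Spec_improve_gpa courses improvement_courses out) := by unfold Spec_improve_gpa; infer_instance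

-- ===== CLAIM =====
def Claim_equal_improve_gpa : Prop := ∀ (courses : List (List String)) (improvement_courses : List (List String)), Dom_improve_gpa courses improvement_courses → Pre_improve_gpa courses improvement_courses → Spec_improve_gpa courses improvement_courses (improve_gpa courses improvement_courses)

-- ===== LEMMAS AND PROOFS =====

-- get? through a foldl-insert: the fold from ∅ wins, otherwise the base dict answers
theorem pv_get?_foldl_insert (imps : List (List String)) (d : PySem.Dict String (List String)) (k : String) :
    ((imps.foldl (fun d imp => d.insert (pvGet0 imp) imp) d).get? k) =
      match (imps.foldl (fun d imp => d.insert (pvGet0 imp) imp) PySem.Dict.empty).get? k with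
      | some v => some v
      | none => d.get? k := by
  induction imps generalizing d with
  | nil => simp [PySem.Dict.get?_empty]
  | cons i rest ih =>
    simp only [List.foldl_cons]
    rw [ih (d.insert (pvGet0 i) i), ih (PySem.Dict.empty.insert (pvGet0 i) i)]
    cases h : (rest.foldl (fun d imp => d.insert (pvGet0 imp) imp) PySem.Dict.empty).get? k with
    | some v => simp
    | none =>
      simp only []
      rw [PySem.Dict.get?_insert, PySem.Dict.get?_insert]
      split_ifs with hk
      · rfl
      · simp [PySem.Dict.get?_empty]

-- so the table of (imp :: imps) answers like the table of imps, falling back to imp at its code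
theorem pv_table_cons (imp : List String) (imps : List (List String)) (k : String) :
    (pvBuildTable (imp :: imps)).get? k =
      match (pvBuildTable imps).get? k with
      | some v => some v
      | none => if k = pvGet0 imp then some imp else none := by
  unfold pvBuildTable
  simp only [List.foldl_cons]
  rw [pv_get?_foldl_insert]
  cases h : (imps.foldl (fun d imp => d.insert (pvGet0 imp) imp) PySem.Dict.empty).get? k with
  | some v => simp
  | none => simp [PySem.Dict.get?_insert, PySem.Dict.get?_empty]

theorem pv_pass_empty (seen : PySem.Set String) (cs : List (List String)) :
    pvPass (pvBuildTable []) seen cs = cs := by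
  induction cs generalizing seen with
  | nil => rfl
  | cons c cs ih =>
    show pvPass (pvBuildTable []) seen (c :: cs) = c :: cs
    unfold pvPass
    have h0 : (pvBuildTable []).get? (pvGet0 c) = none := PySem.Dict.get?_empty _
    rw [h0, ih]

-- membership in a PySem.Set survives add
theorem pv_mem_add (s : PySem.Set String) (x y : String) (h : s.contains x = true) :
    (s.add y).contains x = true := by
  unfold PySem.Set.add
  split_ifs with hy
  · exact h
  · simp only [PySem.Set.contains] at *
    simp at h ⊢
    exact Or.inl h

theorem pv_contains_add (s : PySem.Set String) (x y : String) :
    (s.add y).contains x = (x == y || s.contains x) := by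
  unfold PySem.Set.add
  split_ifs with hy
  · cases hxy : x == y with
    | true =>
      have hx : x = y := by simpa using hxy
      subst hx
      rw [Bool.true_or]
      exact hy
    | false =>
      rw [Bool.false_or]
  · simp only [PySem.Set.contains] at *
    cases hxy : x == y with
    | true =>
      have hx : x = y := by simpa using hxy
      subst hx
      simp
    | false =>
      have hx : ¬ x = y := by simpa using hxy
      simp [hx]

-- T' = table (imp :: imps), T = table imps.  When c0 := pvGet0 imp is already seen,
-- the two tables drive pvPass identically.
theorem pv_pass_seen (imp : List String) (imps : List (List String))
    (cs : List (List String)) (s : PySem.Set String)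
    (hs : s.contains (pvGet0 imp) = true) :
    pvPass (pvBuildTable (imp :: imps)) s cs = pvPass (pvBuildTable imps) s cs := by
  induction cs generalizing s with
  | nil => rfl
  | cons c cs ih =>
    unfold pvPass
    rw [pv_table_cons]
    cases h : (pvBuildTable imps).get? (pvGet0 c) with
    | some v =>
      simp only []
      split_ifs with hseen
      · rw [ih s hs]
      · rw [ih (s.add (pvGet0 c)) (pv_mem_add _ _ _ hs)]
    | none =>
      simp only []
      by_cases hc : pvGet0 c = pvGet0 imp
      · rw [if_pos hc]
        simp only [hc, hs, if_true]
        rw [ih s hs]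
      · rw [if_neg hc]
        simp only []
        rw [ih s hs]
  
-- When T has no entry at c0 and s₁ = s₂ ∪ {c0} (as memberships), the passes agree.
theorem pv_pass_none (imp : List String) (imps : List (List String))
    (cs : List (List String)) (s₁ s₂ : PySem.Set String)
    (hT : (pvBuildTable imps).get? (pvGet0 imp) = none)
    (h0 : s₁.contains (pvGet0 imp) = true)
    (hk : ∀ k, k ≠ pvGet0 imp → s₁.contains k = s₂.contains k) :
    pvPass (pvBuildTable (imp :: imps)) s₁ cs = pvPass (pvBuildTable imps) s₂ cs := by
  induction cs generalizing s₁ s₂ with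
  | nil => rfl
  | cons c cs ih =>
    unfold pvPass
    rw [pv_table_cons]
    by_cases hc : pvGet0 c = pvGet0 imp
    · rw [hc, hT]
      simp only [h0, if_true]
      rw [ih s₁ s₂ h0 hk]
    · cases h : (pvBuildTable imps).get? (pvGet0 c) with
      | some v =>
        simp only [hk _ hc]
        split_ifs with hseen
        · rw [ih s₁ s₂ h0 hk]
        · refine congrArg _ (ih (s₁.add (pvGet0 c)) (s₂.add (pvGet0 c)) (pv_mem_add _ _ _ h0) ?_)
          intro k hkne
          rw [pv_contains_add, pv_contains_add, hk _ hkne]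
      | none =>
        rw [if_neg hc]
        rw [ih s₁ s₂ h0 hk]

theorem pv_contains_add_self (s : PySem.Set String) (x : String) : (s.add x).contains x = true := by
  rw [pv_contains_add]; simp

-- main step: one improvement applied up front equals consing it onto the table,
-- for any 'seen' not yet containing its code
theorem pv_pass_replace (imp : List String) (imps : List (List String))
    (cs : List (List String)) (s : PySem.Set String)
    (hs : s.contains (pvGet0 imp) = false) :
    pvPass (pvBuildTable imps) s (pvReplaceFirst (pvGet0 imp) imp cs) =
      pvPass (pvBuildTable (imp :: imps)) s cs := by
  induction cs generalizing s with
  | nil => rfl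
  | cons c cs ih =>
    by_cases hc : pvGet0 c = pvGet0 imp
    · -- first occurrence of the code: replaced on the left, hit on the right
      unfold pvReplaceFirst
      rw [hc, if_pos rfl]
      unfold pvPass
      rw [pv_table_cons, hc]
      cases h : (pvBuildTable imps).get? (pvGet0 imp) with
      | some v =>
        simp only [hs, Bool.false_eq_true, if_false]
        exact congrArg _ (pv_pass_seen imp imps cs (s.add (pvGet0 imp)) (pv_contains_add_self _ _)).symm
      | none =>
        simp only [hs, Bool.false_eq_true, if_false]
        refine congrArg _ (pv_pass_none imp imps cs (s.add (pvGet0 imp)) s h (pv_contains_add_self _ _) ?_).symm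
        intro k hk
        rw [pv_contains_add]
        cases hkk : k == pvGet0 imp with
        | true => simp at hkk; exact absurd hkk hk
        | false => simp
    · unfold pvReplaceFirst
      rw [if_neg hc]
      unfold pvPass
      rw [pv_table_cons]
      cases h : (pvBuildTable imps).get? (pvGet0 c) with
      | some v =>
        simp only []
        split_ifs with hseen
        · rw [ih s hs]
        · refine congrArg _ (ih (s.add (pvGet0 c)) ?_)
          rw [pv_contains_add, hs]
          cases hkk : pvGet0 imp == pvGet0 c with
          | true => simp at hkk; exact absurd hkk.symm hc
          | false => simp
      | none =>
        simp only [if_neg hc]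
        rw [ih s hs]

theorem pv_main (imps : List (List String)) (cs : List (List String)) :
    improve_gpa cs imps = improve_gpa_alt cs imps := by
  induction imps generalizing cs with
  | nil =>
    unfold improve_gpa improve_gpa_alt
    simp [pv_pass_empty]
  | cons imp rest ih =>
    unfold improve_gpa improve_gpa_alt at *
    simp only [List.foldl_cons]
    rw [ih (pvReplaceFirst (pvGet0 imp) imp cs)]
    exact pv_pass_replace imp rest cs PySem.Set.empty rfl

-- ===== VERDICT =====
theorem improve_gpa_spec : Claim_equal_improve_gpa := by
  intro courses imps _ _
  unfold Spec_improve_gpa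
  exact pv_main imps courses
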